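-- pv_equiv track=rewrite | github.com/kaaveland/advent-of-code-py | y2024/day_24.py | calculate
-- ===== SOURCE A (Python) =====
-- from collections import defaultdict, deque
--
-- def calculate(
--     known: dict[str, bool], calculated: dict[str, tuple[str, str, str]]
-- ) -> int:
--     depends_on = defaultdict(list)
--     for wire, (op, lhs, rhs) in calculated.items():
--         depends_on[lhs].append(wire)
--         depends_on[rhs].append(wire)
--     # Signals that are set
--     wires = known.copy()
--     # Signals we need to propagate
--     work = deque([w for w in wires])
--     while work:
--         current = work.popleft()
--         if current in wires:
--             for next_op in depends_on[current]:
--                 (op, lhs, rhs) = calculated[next_op]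
--                 if lhs in wires and rhs in wires:
--                     if op == "XOR":
--                         wires[next_op] = wires[lhs] ^ wires[rhs]
--                     elif op == "OR":
--                         wires[next_op] = wires[lhs] | wires[rhs]
--                     elif op == "AND":
--                         wires[next_op] = wires[lhs] & wires[rhs]
--                     work.append(next_op)
--     return sum(
--         val << i
--         for i, (wire, val) in enumerate(
--             sorted([(k, v) for k, v in wires.items() if k.startswith("z")])
--         )
--     )
-- ===== SOURCE B (Python) =====
-- def _apply(op, a, b):
--     return (a ^ b) if op == "XOR" else (a | b) if op == "OR" else (a & b)
--
--
-- def calculate(known, calculated):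
--     # Round-based fixpoint: repeatedly sweep the gate list, resolving every
--     # gate whose inputs are already known, until a full sweep makes no progress.
--     wires = dict(known)
--     progress = True
--     while progress:
--         progress = False
--         for wire, (op, lhs, rhs) in calculated.items():
--             if (
--                 wire not in wires
--                 and (op == "XOR" or op == "OR" or op == "AND")
--                 and lhs in wires
--                 and rhs in wires
--             ):
--                 wires[wire] = _apply(op, wires[lhs], wires[rhs])
--                 progress = True
--     return sum(
--         val << i
--         for i, (wire, val) in enumerate(
--             sorted((k, v) for k, v in wires.items() if k.startswith("z"))
--         )
--     )
-- ===== Notes on version B (the rewrite author's own statement) =====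
-- stated objective: alternative
-- what changed: Replaces A's dependency-index-plus-BFS-worklist propagation (a deque seeded with the known wires, firing dependent gates per pop) with repeated full sweeps over the gate list that resolve every fireable gate until a sweep makes no progress (round-based fixpoint); Pre_ excludes inputs where some wire is both a key of known and a key of calculated, on which A overwrites the given input value with a recomputed one (and can loop forever on an activated cycle) while B keeps the input value.
-- outside the precondition, e.g. on calculate({'x': True, 'z1': False}, {'z1': ('AND', 'x', 'x')}): A returns 1, B returns 0
import Mathlib
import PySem

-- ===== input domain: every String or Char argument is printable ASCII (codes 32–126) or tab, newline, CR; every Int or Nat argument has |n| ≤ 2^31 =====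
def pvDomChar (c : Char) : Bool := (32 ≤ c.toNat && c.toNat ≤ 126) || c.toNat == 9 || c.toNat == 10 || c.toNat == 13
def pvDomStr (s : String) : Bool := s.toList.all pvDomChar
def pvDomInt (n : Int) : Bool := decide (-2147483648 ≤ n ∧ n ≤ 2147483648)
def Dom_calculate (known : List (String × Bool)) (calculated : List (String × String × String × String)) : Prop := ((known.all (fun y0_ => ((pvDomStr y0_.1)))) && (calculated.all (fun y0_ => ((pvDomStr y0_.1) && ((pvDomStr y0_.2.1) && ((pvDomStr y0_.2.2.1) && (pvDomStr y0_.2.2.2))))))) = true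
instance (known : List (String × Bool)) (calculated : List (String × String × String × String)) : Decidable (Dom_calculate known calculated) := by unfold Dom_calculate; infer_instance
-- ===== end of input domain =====

-- B replaces A's dependency-index + BFS worklist with repeated full sweeps over the
-- gate list until a sweep resolves nothing (round-based fixpoint); same result on Pre_.

-- ===== PORT A =====

-- sum(val << i for i, (wire, val) in enumerate(sorted([(k, v) for k, v in wires.items() if k.startswith("z")])))
-- (this final line is textually identical in A and in B, so both ports share this helper;
--  enumerate indices are ≥ 0, so `.toNat` on them is exact)
def pvZSum (wires : PySem.Dict String Bool) : Int :=
  (PySem.List.enumerate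
      (PySem.List.sorted2 (wires.items.filter (fun kv => PySem.Str.startswith kv.1 "z"))
        (fun kv => kv.1) (fun kv => kv.2))).foldl
    (fun acc p => acc + ((if p.2.2 then (1 : Int) else 0) <<< p.1.toNat)) 0

-- body of A's `for next_op in depends_on[current]` loop; the `none` branch of the match is
-- unreachable (depends_on only holds keys of `calculated`; Python would raise KeyError)
def pvAStep (calcD : PySem.Dict String (String × String × String))
    (st : PySem.Dict String Bool × List String) (nextOp : String) :
    PySem.Dict String Bool × List String :=
  match calcD.get? nextOp with
  | none => st
  | some (op, lhs, rhs) =>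
    if st.1.contains lhs && st.1.contains rhs then
      let a := st.1.getD lhs false
      let b := st.1.getD rhs false
      let wires :=
        if op == "XOR" then st.1.insert nextOp (xor a b)
        else if op == "OR" then st.1.insert nextOp (a || b)
        else if op == "AND" then st.1.insert nextOp (a && b)
        else st.1
      (wires, st.2 ++ [nextOp])
    else st

-- A's `while work:` loop (deque = FIFO list); fuel is only a termination device:
-- under Pre_ the queue provably empties before the fuel does
def pvALoop (calcD : PySem.Dict String (String × String × String))
    (depends : PySem.Dict String (List String)) :
    Nat → PySem.Dict String Bool → List String → PySem.Dict String Bool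
  | 0, wires, _ => wires
  | _ + 1, wires, [] => wires
  | fuel + 1, wires, current :: work =>
    if wires.contains current then
      let st := (depends.getD current []).foldl (pvAStep calcD) (wires, work)
      pvALoop calcD depends fuel st.1 st.2
    else
      pvALoop calcD depends fuel wires work

def calculate (known : List (String × Bool)) (calculated : List (String × String × String × String)) : Int :=
  let calcD := PySem.Dict.ofList calculated
  let depends := calcD.items.foldl
    (fun d g => (d.modify g.2.2.1 [] (fun l => l ++ [g.1])).modify g.2.2.2 [] (fun l => l ++ [g.1]))
    PySem.Dict.empty
  let wires := PySem.Dict.ofList known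
  let n := calculated.length
  pvZSum (pvALoop calcD depends (known.length * (2 * n + 2) ^ (n * (n + 1) + 1) + 1) wires wires.keys)

-- ===== PORT B =====

-- Source B's `_apply(op, a, b)`
def pvOpVal (op : String) (a b : Bool) : Bool :=
  if op == "XOR" then xor a b else if op == "OR" then a || b else a && b

-- body of Source B's `for wire, (op, lhs, rhs) in calculated.items()` sweep
def pvBStep (st : PySem.Dict String Bool × Bool) (g : String × String × String × String) :
    PySem.Dict String Bool × Bool :=
  if !st.1.contains g.1 && (g.2.1 == "XOR" || g.2.1 == "OR" || g.2.1 == "AND")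
      && st.1.contains g.2.2.1 && st.1.contains g.2.2.2 then
    (st.1.insert g.1 (pvOpVal g.2.1 (st.1.getD g.2.2.1 false) (st.1.getD g.2.2.2 false)), true)
  else st

-- Source B's `while progress:` loop; fuel is only a termination device: each progressing
-- sweep resolves at least one new gate, so `calculated.length + 1` sweeps always suffice
def pvBLoop (gates : List (String × String × String × String)) :
    Nat → PySem.Dict String Bool → PySem.Dict String Bool
  | 0, wires => wires
  | fuel + 1, wires =>
    let st := gates.foldl pvBStep (wires, false)
    if st.2 then pvBLoop gates fuel st.1 else st.1

def calculate_alt (known : List (String × Bool)) (calculated : List (String × String × String × String)) : Int :=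
  let wires := PySem.Dict.ofList known
  let gates := (PySem.Dict.ofList calculated).items
  pvZSum (pvBLoop gates (calculated.length + 1) wires)

-- ===== PRECONDITION & SPEC =====

-- Pre_ excludes inputs where some wire is both a key of `known` and a key of `calculated`:
-- there A overwrites the given input value with a recomputed one (and can loop forever on
-- an activated cycle) while B keeps the input value; both behaviours are accidents.
def Pre_calculate (known : List (String × Bool)) (calculated : List (String × String × String × String)) : Prop :=
  ∀ p ∈ known, ∀ q ∈ calculated, p.1 ≠ q.1
instance (known : List (String × Bool)) (calculated : List (String × String × String × String)) : Decidable (Pre_calculate known calculated) := by unfold Pre_calculate; infer_instance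

def pvWitness_calculate : (List (String × Bool)) × (List (String × String × String × String)) :=
  ([("x00", true), ("y00", false)], [("z00", "AND", "x00", "y00"), ("z01", "XOR", "z00", "x00")])

def Spec_calculate (known : List (String × Bool)) (calculated : List (String × String × String × String)) (out : Int) : Prop := out = calculate_alt known calculated
instance (known : List (String × Bool)) (calculated : List (String × String × String × String)) (out : Int) : Decidable (Spec_calculate known calculated out) := by unfold Spec_calculate; infer_instance

-- ===== CLAIM (what is proved, stated in full; the proofs are below) =====
def Claim_equal_calculate : Prop := ∀ (known : List (String × Bool)) (calculated : List (String × String × String × String)), Dom_calculate known calculated → Pre_calculate known calculated → Spec_calculate known calculated (calculate known calculated)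

-- ===== LEMMAS AND PROOFS =====

-- ---- spec-side objects: one sweep as a fold of `pvApplyGate`, its iterate, flat stages ----

def pvValidOp (op : String) : Bool := op == "XOR" || op == "OR" || op == "AND"

def pvApplyGate (σ : PySem.Dict String Bool) (g : String × String × String × String) :
    PySem.Dict String Bool :=
  if !σ.contains g.1 && (g.2.1 == "XOR" || g.2.1 == "OR" || g.2.1 == "AND")
      && σ.contains g.2.2.1 && σ.contains g.2.2.2 then
    σ.insert g.1 (pvOpVal g.2.1 (σ.getD g.2.2.1 false) (σ.getD g.2.2.2 false))
  else σ

def pvSweep (gates : List (String × String × String × String)) (σ : PySem.Dict String Bool) :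
    PySem.Dict String Bool := gates.foldl pvApplyGate σ

def pvFlat (gates : List (String × String × String × String)) (m : Nat) :
    List (String × String × String × String) := (List.replicate m gates).flatten

def pvSi (base : PySem.Dict String Bool) (flat : List (String × String × String × String)) (i : Nat) :
    PySem.Dict String Bool := (flat.take i).foldl pvApplyGate base

def pvSigma (base : PySem.Dict String Bool) (gates : List (String × String × String × String)) (m : Nat) :
    PySem.Dict String Bool := (pvFlat gates m).foldl pvApplyGate base

def pvSeek (base : PySem.Dict String Bool) (flat : List (String × String × String × String))
    (w : String) : Nat → Nat → Nat
  | 0, i => i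
  | fuel + 1, i => if (pvSi base flat i).contains w then i else pvSeek base flat w fuel (i + 1)

def pvStage (base : PySem.Dict String Bool) (flat : List (String × String × String × String))
    (w : String) : Nat := pvSeek base flat w (flat.length + 1) 0

def pvPot (base : PySem.Dict String Bool) (gates : List (String × String × String × String))
    (m : Nat) (w : String) : Nat :=
  if (pvSigma base gates m).contains w then
    (2 * gates.length + 2) ^ ((pvFlat gates m).length + 1 - pvStage base (pvFlat gates m) w)
  else 1

def pvPhi (base : PySem.Dict String Bool) (gates : List (String × String × String × String))
    (m : Nat) (ws : List String) : Nat := (ws.map (pvPot base gates m)).sum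

def pvSubmap (d d' : PySem.Dict String Bool) : Prop :=
  ∀ k v, d.get? k = some v → d'.get? k = some v

def pvGateFor (gates : List (String × String × String × String)) (w u : String) : Prop :=
  ∃ g ∈ gates, g.1 = w ∧ (g.2.2.1 = u ∨ g.2.2.2 = u)

def pvCInv (gates : List (String × String × String × String)) (σ wires : PySem.Dict String Bool)
    (work : List String) : Prop :=
  ∀ w, σ.contains w = true → wires.contains w = false →
    ∃ u, pvGateFor gates w u ∧ σ.contains u = true ∧ (wires.contains u = false ∨ u ∈ work)

-- ---- basic submap / contains facts ----

lemma pvContains_of_get? {α : Type} {d : PySem.Dict String α} {k : String} {v : α}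
    (h : d.get? k = some v) : d.contains k = true := by
  by_contra hc
  have hc' : d.contains k = false := by cases hcc : d.contains k <;> simp_all
  rw [← PySem.Dict.get?_eq_none_iff_contains] at hc'
  simp [h] at hc'

lemma pvGet?_of_contains {α : Type} {d : PySem.Dict String α} {k : String}
    (h : d.contains k = true) : ∃ v, d.get? k = some v := by
  cases hg : d.get? k with
  | none => rw [PySem.Dict.get?_eq_none_iff_contains] at hg; simp [hg] at h
  | some v => exact ⟨v, rfl⟩

lemma pvSubmap_contains {d d' : PySem.Dict String Bool} (h : pvSubmap d d') {k : String}
    (hk : d.contains k = true) : d'.contains k = true := by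
  obtain ⟨v, hv⟩ := pvGet?_of_contains hk
  exact pvContains_of_get? (h k v hv)

lemma pvGet?_getD {α : Type} {d : PySem.Dict String α} {k : String} {v₀ : α}
    (h : d.contains k = true) : d.get? k = some (d.getD k v₀) := by
  obtain ⟨v, hv⟩ := pvGet?_of_contains h
  rw [hv, PySem.Dict.getD_eq_get?_getD, hv]; rfl

-- ---- applyGate: monotone, stable ----

lemma pvApplyGate_get? {σ : PySem.Dict String Bool} {g} {k : String} {v : Bool}
    (h : σ.get? k = some v) : (pvApplyGate σ g).get? k = some v := by
  unfold pvApplyGate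
  split
  · next hcond =>
    have hnc : σ.contains g.1 = false := by
      rcases Bool.and_eq_true_iff.mp (Bool.and_eq_true_iff.mp (Bool.and_eq_true_iff.mp hcond).1).1
        with ⟨h1, _⟩
      simpa using h1
    rw [PySem.Dict.get?_insert]
    split
    · next hk => subst hk; rw [pvContains_of_get? h] at hnc; cases hnc
    · exact h
  · exact h

lemma pvSweep_get? {gs : List (String × String × String × String)} {σ : PySem.Dict String Bool}
    {k : String} {v : Bool} (h : σ.get? k = some v) : (pvSweep gs σ).get? k = some v := by
  induction gs generalizing σ with
  | nil => exact h
  | cons g gs ih => exact ih (pvApplyGate_get? h)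

lemma pvApplyGate_nodup {σ : PySem.Dict String Bool} {g} (h : σ.keys.Nodup) :
    (pvApplyGate σ g).keys.Nodup := by
  unfold pvApplyGate
  split
  · exact PySem.Dict.nodup_keys_insert _ _ _ h
  · exact h

lemma pvApplyGate_contains_of {σ : PySem.Dict String Bool} {g} {k : String}
    (h : (pvApplyGate σ g).contains k = true) : σ.contains k = true ∨ k = g.1 := by
  unfold pvApplyGate at h
  split at h
  · rw [PySem.Dict.contains_insert] at h
    rcases Bool.or_eq_true_iff.mp h with h1 | h1
    · exact Or.inr (by simpa using h1)
    · exact Or.inl h1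
  · exact Or.inl h

-- ---- stages ----

lemma pvSi_succ {base : PySem.Dict String Bool} {flat} {i : Nat} (h : i < flat.length) :
    pvSi base flat (i + 1) = pvApplyGate (pvSi base flat i) flat[i] := by
  unfold pvSi
  rw [List.take_succ, List.getElem?_eq_getElem h]
  simp only [Option.toList_some, List.foldl_append, List.foldl_cons, List.foldl_nil]

lemma pvSi_get?_mono {base : PySem.Dict String Bool} {flat} {i j : Nat} (hij : i ≤ j)
    {k : String} {v : Bool} (h : (pvSi base flat i).get? k = some v) :
    (pvSi base flat j).get? k = some v := by
  induction j, hij using Nat.le_induction with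
  | base => exact h
  | succ j hij ih =>
    rcases Nat.lt_or_ge j flat.length with hj | hj
    · rw [pvSi_succ hj]; exact pvApplyGate_get? ih
    · show (List.foldl pvApplyGate base (flat.take (j + 1))).get? k = some v
      rw [List.take_of_length_le (by omega), ← List.take_of_length_le hj]
      exact ih

lemma pvSi_length (base : PySem.Dict String Bool) (gates m) :
    pvSi base (pvFlat gates m) (pvFlat gates m).length = pvSigma base gates m := by
  unfold pvSi pvSigma
  rw [List.take_length]

lemma pvSeek_spec (base : PySem.Dict String Bool) (flat) (w : String) :
    ∀ fuel i, i ≤ pvSeek base flat w fuel i ∧ pvSeek base flat w fuel i ≤ i + fuel ∧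
      (∀ j, i ≤ j → j < pvSeek base flat w fuel i → (pvSi base flat j).contains w = false) ∧
      ((pvSi base flat (pvSeek base flat w fuel i)).contains w = true ∨
        pvSeek base flat w fuel i = i + fuel) := by
  intro fuel
  induction fuel with
  | zero => intro i; refine ⟨Nat.le_refl _, by simp [pvSeek], fun j h1 h2 => by
      simp [pvSeek] at h2; omega, Or.inr (by simp [pvSeek])⟩
  | succ fuel ih =>
    intro i
    by_cases hc : (pvSi base flat i).contains w = true
    · have hs : pvSeek base flat w (fuel + 1) i = i := by simp [pvSeek, hc]
      rw [hs]
      exact ⟨Nat.le_refl _, by omega, fun j h1 h2 => by omega, Or.inl hc⟩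
    · have hc' : (pvSi base flat i).contains w = false := by
        cases hcc : (pvSi base flat i).contains w <;> simp_all
      obtain ⟨ih1, ih2, ih3, ih4⟩ := ih (i + 1)
      refine ⟨?_, ?_, ?_, ?_⟩ <;> simp only [pvSeek, hc', Bool.false_eq_true, if_false]
      · omega
      · omega
      · intro j h1 h2
        rcases Nat.eq_or_lt_of_le h1 with he | hlt
        · subst he; exact hc'
        · exact ih3 j (by omega) h2
      · rcases ih4 with h4 | h4
        · exact Or.inl h4
        · exact Or.inr (by omega)

lemma pvStage_spec {base : PySem.Dict String Bool} {flat} {w : String}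
    (h : (pvSi base flat flat.length).contains w = true) :
    pvStage base flat w ≤ flat.length ∧ (pvSi base flat (pvStage base flat w)).contains w = true := by
  obtain ⟨h1, h2, h3, h4⟩ := pvSeek_spec base flat w (flat.length + 1) 0
  unfold pvStage
  rcases h4 with h4 | h4
  · refine ⟨?_, h4⟩
    by_contra hgt
    have := h3 flat.length (by omega) (by omega)
    rw [this] at h; cases h
  · exfalso
    have := h3 flat.length (by omega) (by omega)
    rw [this] at h; cases h

lemma pvStage_min {base : PySem.Dict String Bool} {flat} {w : String} {j : Nat}
    (hj : j < pvStage base flat w) : (pvSi base flat j).contains w = false := by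
  obtain ⟨_, _, h3, _⟩ := pvSeek_spec base flat w (flat.length + 1) 0
  exact h3 j (by omega) hj

lemma pvStage_le_of_contains {base : PySem.Dict String Bool} {flat} {w : String} {j : Nat}
    (hj : j ≤ flat.length) (h : (pvSi base flat j).contains w = true) :
    pvStage base flat w ≤ j := by
  by_contra hgt
  rw [pvStage_min (by omega)] at h; cases h

-- ---- key uniqueness ----

lemma pvKey_unique {gates : List (String × String × String × String)}
    (hnd : (gates.map (fun g => g.1)).Nodup) {g g' : String × String × String × String}
    (hg : g ∈ gates) (hg' : g' ∈ gates) (h : g.1 = g'.1) : g = g' := by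
  induction gates with
  | nil => cases hg
  | cons x gates ih =>
    rw [List.map_cons, List.nodup_cons] at hnd
    rcases List.mem_cons.mp hg with rfl | hg₁ <;> rcases List.mem_cons.mp hg' with rfl | hg₂
    · rfl
    · exact absurd (by rw [h]; exact List.mem_map_of_mem (f := fun g => g.1) hg₂) hnd.1
    · exact absurd (by rw [← h]; exact List.mem_map_of_mem (f := fun g => g.1) hg₁) hnd.1
    · exact ih hnd.2 hg₁ hg₂

-- ---- the gate fact: how a non-base wire got its value in σ ----

lemma pvGateFact {base : PySem.Dict String Bool} {gates : List (String × String × String × String)}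
    {m : Nat} {w : String}
    (h : (pvSigma base gates m).contains w = true) (hb : base.contains w = false) :
    ∃ g ∈ gates, g.1 = w ∧ pvValidOp g.2.1 = true ∧
      ∃ a b, (pvSigma base gates m).get? g.2.2.1 = some a ∧
        (pvSigma base gates m).get? g.2.2.2 = some b ∧
        (pvSigma base gates m).get? w = some (pvOpVal g.2.1 a b) ∧
        pvStage base (pvFlat gates m) g.2.2.1 < pvStage base (pvFlat gates m) w ∧
        pvStage base (pvFlat gates m) g.2.2.2 < pvStage base (pvFlat gates m) w := by
  have hL : (pvSi base (pvFlat gates m) (pvFlat gates m).length).contains w = true := by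
    rw [pvSi_length]; exact h
  obtain ⟨hsle, hsc⟩ := pvStage_spec hL
  set flat := pvFlat gates m with hflat
  have hflatlen : flat.length = (pvFlat gates m).length := rfl
  set s := pvStage base flat w with hs
  have hspos : 0 < s := by
    rcases Nat.eq_zero_or_pos s with h0 | h0
    · exfalso; rw [h0] at hsc
      rw [show pvSi base flat 0 = base from rfl] at hsc
      rw [hsc] at hb; cases hb
    · exact h0
  have hi : s - 1 < flat.length := by omega
  have hstep : pvSi base flat s = pvApplyGate (pvSi base flat (s - 1)) flat[s - 1] := by
    conv_lhs => rw [show s = (s - 1) + 1 by omega]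
    exact pvSi_succ hi
  have hprev : (pvSi base flat (s - 1)).contains w = false := pvStage_min (by omega)
  set σp := pvSi base flat (s - 1) with hσp
  set g := flat[s - 1] with hgdef
  have hgmem : g ∈ gates := by
    have : g ∈ flat := List.getElem_mem hi
    rw [hflat] at this
    unfold pvFlat at this
    obtain ⟨l, hl, hgl⟩ := List.mem_flatten.mp this
    rw [List.eq_of_mem_replicate hl] at hgl
    exact hgl
  -- the step must have fired and inserted w
  have hcs : (pvApplyGate σp g).contains w = true := by rw [← hstep]; exact hsc
  rcases pvApplyGate_contains_of hcs with hcc | hkey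
  · rw [hprev] at hcc; cases hcc
  have hcond : (!σp.contains g.1 && (g.2.1 == "XOR" || g.2.1 == "OR" || g.2.1 == "AND")
      && σp.contains g.2.2.1 && σp.contains g.2.2.2) = true := by
    by_contra hnc
    have : pvApplyGate σp g = σp := by
      unfold pvApplyGate; split
      · next hcc => exact absurd hcc hnc
      · rfl
    rw [this] at hcs; rw [hcs] at hprev; cases hprev
  have hc1 := (Bool.and_eq_true_iff.mp hcond).2
  have hc2 := (Bool.and_eq_true_iff.mp (Bool.and_eq_true_iff.mp hcond).1).2
  have hc3 := (Bool.and_eq_true_iff.mp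
    (Bool.and_eq_true_iff.mp (Bool.and_eq_true_iff.mp hcond).1).1).2
  have hval : pvValidOp g.2.1 = true := by unfold pvValidOp; exact hc3
  have happ : pvApplyGate σp g
      = σp.insert g.1 (pvOpVal g.2.1 (σp.getD g.2.2.1 false) (σp.getD g.2.2.2 false)) := by
    unfold pvApplyGate; rw [if_pos hcond]
  -- values at the inputs at stage s-1, carried to σ
  have hla : σp.get? g.2.2.1 = some (σp.getD g.2.2.1 false) := pvGet?_getD hc2
  have hra : σp.get? g.2.2.2 = some (σp.getD g.2.2.2 false) := pvGet?_getD hc1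
  have hlσ : (pvSigma base gates m).get? g.2.2.1 = some (σp.getD g.2.2.1 false) := by
    rw [← pvSi_length base gates m]; exact pvSi_get?_mono (by omega) hla
  have hrσ : (pvSigma base gates m).get? g.2.2.2 = some (σp.getD g.2.2.2 false) := by
    rw [← pvSi_length base gates m]; exact pvSi_get?_mono (by omega) hra
  have hwv : (pvSi base flat s).get? w
      = some (pvOpVal g.2.1 (σp.getD g.2.2.1 false) (σp.getD g.2.2.2 false)) := by
    rw [hstep, happ, PySem.Dict.get?_insert, if_pos hkey]
  have hwσ : (pvSigma base gates m).get? w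
      = some (pvOpVal g.2.1 (σp.getD g.2.2.1 false) (σp.getD g.2.2.2 false)) := by
    rw [← pvSi_length base gates m]; exact pvSi_get?_mono hsle hwv
  refine ⟨g, hgmem, hkey.symm, hval, σp.getD g.2.2.1 false, σp.getD g.2.2.2 false,
    hlσ, hrσ, ?_, ?_, ?_⟩
  · exact hwσ
  · have hlen : s - 1 ≤ flat.length := by omega
    have := pvStage_le_of_contains (flat := flat) (j := s - 1) hlen hc2; omega
  · have hlen : s - 1 ≤ flat.length := by omega
    have := pvStage_le_of_contains (flat := flat) (j := s - 1) hlen hc1; omega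

-- ---- stabilization and closedness ----

lemma pvApplyGate_size_lt {σ : PySem.Dict String Bool} {g}
    (h : pvApplyGate σ g ≠ σ) : σ.size < (pvApplyGate σ g).size := by
  unfold pvApplyGate at *
  split at h
  · next hc =>
    have hnc : σ.contains g.1 = false := by
      rcases Bool.and_eq_true_iff.mp (Bool.and_eq_true_iff.mp (Bool.and_eq_true_iff.mp hc).1).1
        with ⟨h1, _⟩
      simpa using h1
    split
    · rw [PySem.Dict.size_insert, hnc]; simp
    · rw [PySem.Dict.size_insert, hnc]; simp
  · exact absurd rfl h

lemma pvApplyGate_size_mono (σ : PySem.Dict String Bool) (g) :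
    σ.size ≤ (pvApplyGate σ g).size := by
  by_cases h : pvApplyGate σ g = σ
  · rw [h]
  · exact Nat.le_of_lt (pvApplyGate_size_lt h)

lemma pvSize_mono_sweep' (gs : List (String × String × String × String))
    (σ : PySem.Dict String Bool) : σ.size ≤ (pvSweep gs σ).size := by
  induction gs generalizing σ with
  | nil => exact Nat.le_refl _
  | cons g gs ih => exact Nat.le_trans (pvApplyGate_size_mono σ g) (ih (pvApplyGate σ g))

lemma pvSweep_eq_of_size_eq {gs : List (String × String × String × String)}
    {σ : PySem.Dict String Bool} (h : (pvSweep gs σ).size = σ.size) : pvSweep gs σ = σ := by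
  induction gs generalizing σ with
  | nil => rfl
  | cons g gs ih =>
    have hstep : pvSweep (g :: gs) σ = pvSweep gs (pvApplyGate σ g) := rfl
    rw [hstep] at h ⊢
    have h1 : pvApplyGate σ g = σ := by
      by_contra hne
      have := pvApplyGate_size_lt hne
      have := pvSize_mono_sweep' gs (pvApplyGate σ g)
      omega
    rw [h1] at h ⊢
    exact ih h



lemma pvApplyGate_fix_closed {σ : PySem.Dict String Bool} {g}
    (h : pvApplyGate σ g = σ) (hv : pvValidOp g.2.1 = true)
    (hl : σ.contains g.2.2.1 = true) (hr : σ.contains g.2.2.2 = true) :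
    σ.contains g.1 = true := by
  by_contra hc
  have hc' : σ.contains g.1 = false := by cases hcc : σ.contains g.1 <;> simp_all
  unfold pvValidOp at hv
  have hcond : (!σ.contains g.1 && (g.2.1 == "XOR" || g.2.1 == "OR" || g.2.1 == "AND")
      && σ.contains g.2.2.1 && σ.contains g.2.2.2) = true := by
    rw [hc', hl, hr, hv]; rfl
  unfold pvApplyGate at h
  rw [if_pos hcond] at h
  have : (σ.insert g.1 (pvOpVal g.2.1 (σ.getD g.2.2.1 false) (σ.getD g.2.2.2 false))).contains g.1
      = true := by rw [PySem.Dict.contains_insert]; simp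
  rw [h, hc'] at this; cases this

lemma pvSweep_fix_each {gs : List (String × String × String × String)} {σ : PySem.Dict String Bool}
    (h : pvSweep gs σ = σ) : ∀ g ∈ gs, pvApplyGate σ g = σ := by
  induction gs with
  | nil => intro g hg; cases hg
  | cons g₀ gs ih =>
    have hstep : pvSweep (g₀ :: gs) σ = pvSweep gs (pvApplyGate σ g₀) := rfl
    have h1 : pvApplyGate σ g₀ = σ := by
      by_contra hne
      have h2 := pvApplyGate_size_lt hne
      have h3 := pvSize_mono_sweep' gs (pvApplyGate σ g₀)
      rw [hstep] at h
      have := congrArg PySem.Dict.size h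
      omega
    intro g hg
    rcases List.mem_cons.mp hg with rfl | hg₁
    · exact h1
    · exact ih (by rw [hstep, h1] at h; exact h) g hg₁

lemma pvSigma_eq_iterate (base : PySem.Dict String Bool) (gates m) :
    pvSigma base gates m = (pvSweep gates)^[m] base := by
  induction m generalizing base with
  | zero => rfl
  | succ m ih =>
    unfold pvSigma pvFlat at *
    rw [List.replicate_succ, List.flatten_cons, List.foldl_append,
      Function.iterate_succ_apply]
    exact ih (pvSweep gates base)

lemma pvSweep_nodup {gs : List (String × String × String × String)}
    {σ : PySem.Dict String Bool} (h : σ.keys.Nodup) : (pvSweep gs σ).keys.Nodup := by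
  induction gs generalizing σ with
  | nil => exact h
  | cons g gs ih => exact ih (pvApplyGate_nodup h)

lemma pvSweep_contains_of {gs : List (String × String × String × String)}
    {σ : PySem.Dict String Bool} {k : String} (h : (pvSweep gs σ).contains k = true) :
    σ.contains k = true ∨ k ∈ gs.map (fun g => g.1) := by
  induction gs generalizing σ with
  | nil => exact Or.inl h
  | cons g gs ih =>
    rcases ih (σ := pvApplyGate σ g) h with h1 | h1
    · rcases pvApplyGate_contains_of h1 with h2 | h2
      · exact Or.inl h2
      · exact Or.inr (by simp [h2])
    · exact Or.inr (by simp [h1])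

lemma pvIter_contains_of {gates : List (String × String × String × String)}
    {base : PySem.Dict String Bool} {k : String} {j : Nat}
    (h : ((pvSweep gates)^[j] base).contains k = true) :
    base.contains k = true ∨ k ∈ gates.map (fun g => g.1) := by
  induction j generalizing base with
  | zero => exact Or.inl h
  | succ j ih =>
    rw [Function.iterate_succ_apply] at h
    rcases ih h with h1 | h1
    · exact pvSweep_contains_of h1
    · exact Or.inr h1

lemma pvIter_nodup {gates : List (String × String × String × String)}
    {base : PySem.Dict String Bool} (hnd : base.keys.Nodup) (j : Nat) :
    ((pvSweep gates)^[j] base).keys.Nodup := by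
  induction j generalizing base with
  | zero => exact hnd
  | succ j ih => rw [Function.iterate_succ_apply]; exact ih (pvSweep_nodup hnd)

lemma pvSize_keys (d : PySem.Dict String Bool) : d.size = d.keys.length := by
  unfold PySem.Dict.size
  simp only [PySem.Dict.keys, List.length_map]

lemma pvIter_size_le {gates : List (String × String × String × String)}
    {base : PySem.Dict String Bool} (hnd : base.keys.Nodup) (j : Nat) :
    ((pvSweep gates)^[j] base).size ≤ base.size + gates.length := by
  set d := (pvSweep gates)^[j] base with hd
  have hdn : d.keys.Nodup := pvIter_nodup hnd j
  have hsub : d.keys ⊆ base.keys ++ gates.map (fun g => g.1) := by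
    intro k hk
    rw [← PySem.Dict.contains_iff_mem_keys] at hk
    rcases pvIter_contains_of hk with h1 | h1
    · exact List.mem_append_left _ ((PySem.Dict.contains_iff_mem_keys _ _).mp h1)
    · exact List.mem_append_right _ h1
  have h1 : d.keys.length = d.keys.toFinset.card := (List.toFinset_card_of_nodup hdn).symm
  have h2 : d.keys.toFinset ⊆ (base.keys ++ gates.map (fun g => g.1)).toFinset := by
    intro x hx
    rw [List.mem_toFinset] at hx ⊢
    exact hsub hx
  have h3 := Finset.card_le_card h2
  have h4 := List.toFinset_card_le (base.keys ++ gates.map (fun g => g.1))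
  rw [List.length_append, List.length_map] at h4
  rw [pvSize_keys d, pvSize_keys base]
  omega

lemma pvSigma_fix {base : PySem.Dict String Bool} {gates : List (String × String × String × String)}
    {m : Nat} (hnd : base.keys.Nodup) (hm : gates.length < m) :
    pvSweep gates (pvSigma base gates m) = pvSigma base gates m := by
  rw [pvSigma_eq_iterate]
  -- some sweep below gates.length + 1 is a no-op, after which everything is fixed
  have key : ∃ k ≤ gates.length, pvSweep gates ((pvSweep gates)^[k] base)
      = (pvSweep gates)^[k] base := by
    by_contra hno
    have hno : ∀ k ≤ gates.length, pvSweep gates ((pvSweep gates)^[k] base)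
        ≠ (pvSweep gates)^[k] base := fun k hk he => hno ⟨k, hk, he⟩
    have grow : ∀ k ≤ gates.length + 1, base.size + k ≤ ((pvSweep gates)^[k] base).size := by
      intro k hk
      induction k with
      | zero => simp
      | succ k ih =>
        have h1 := ih (by omega)
        have hne := hno k (by omega)
        rw [Function.iterate_succ_apply']
        have h2 : ((pvSweep gates)^[k] base).size
            < (pvSweep gates ((pvSweep gates)^[k] base)).size := by
          rcases Nat.lt_or_ge ((pvSweep gates)^[k] base).size
            ((pvSweep gates ((pvSweep gates)^[k] base)).size) with h | h
          · exact h
          · exact absurd (pvSweep_eq_of_size_eq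
              (Nat.le_antisymm h (pvSize_mono_sweep' _ _))) hne
        omega
    have := grow (gates.length + 1) (Nat.le_refl _)
    have := pvIter_size_le (gates := gates) hnd (gates.length + 1)
    omega
  obtain ⟨k, hk, hfix⟩ := key
  have hiter : ∀ j, (pvSweep gates)^[k + j] base = (pvSweep gates)^[k] base := by
    intro j
    rw [Nat.add_comm, Function.iterate_add_apply]
    exact Function.iterate_fixed hfix j
  have h1 : (pvSweep gates)^[m] base = (pvSweep gates)^[k] base := by
    have := hiter (m - k); rw [show k + (m - k) = m by omega] at this; exact this
  rw [h1, hfix]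

lemma pvClosed {base : PySem.Dict String Bool} {gates : List (String × String × String × String)}
    {m : Nat} (hnd : base.keys.Nodup) (hm : gates.length < m) :
    ∀ g ∈ gates, pvValidOp g.2.1 = true →
      (pvSigma base gates m).contains g.2.2.1 = true →
      (pvSigma base gates m).contains g.2.2.2 = true →
      (pvSigma base gates m).contains g.1 = true := by
  intro g hg hv hl hr
  exact pvApplyGate_fix_closed (pvSweep_fix_each (pvSigma_fix hnd hm) g hg) hv hl hr

lemma pvBase_sub_sigma (base : PySem.Dict String Bool) (gates m) :
    pvSubmap base (pvSigma base gates m) := by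
  intro k v h
  unfold pvSigma
  exact pvSweep_get? (gs := pvFlat gates m) h

-- ---- B loop = iterated sweep ----

lemma pvBStep_fst (st : PySem.Dict String Bool × Bool) (g) :
    (pvBStep st g).1 = pvApplyGate st.1 g := by
  unfold pvBStep pvApplyGate
  split <;> rfl

lemma pvBFold_fst (gs : List (String × String × String × String)) (σ : PySem.Dict String Bool)
    (p : Bool) : (gs.foldl pvBStep (σ, p)).1 = pvSweep gs σ := by
  induction gs generalizing σ p with
  | nil => rfl
  | cons g gs ih =>
    rw [List.foldl_cons]
    have h1 : gs.foldl pvBStep (pvBStep (σ, p) g)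
        = gs.foldl pvBStep ((pvBStep (σ, p) g).1, (pvBStep (σ, p) g).2) := rfl
    rw [h1, pvBStep_fst]
    exact ih (pvApplyGate σ g) _

lemma pvBFold_flag (gs : List (String × String × String × String)) (σ : PySem.Dict String Bool) :
    (gs.foldl pvBStep (σ, true)).2 = true := by
  induction gs generalizing σ with
  | nil => rfl
  | cons g gs ih =>
    rw [List.foldl_cons]
    unfold pvBStep
    split
    · exact ih _
    · exact ih σ

lemma pvBFold_no_progress {gs : List (String × String × String × String)}
    {σ : PySem.Dict String Bool} {p : Bool} (h : (gs.foldl pvBStep (σ, p)).2 = false) :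
    pvSweep gs σ = σ := by
  induction gs generalizing σ p with
  | nil => rfl
  | cons g gs ih =>
    rw [List.foldl_cons] at h
    by_cases hc : (!σ.contains g.1 && (g.2.1 == "XOR" || g.2.1 == "OR" || g.2.1 == "AND")
        && σ.contains g.2.2.1 && σ.contains g.2.2.2) = true
    · exfalso
      have hstep : pvBStep (σ, p) g = (σ.insert g.1 (pvOpVal g.2.1 (σ.getD g.2.2.1 false)
          (σ.getD g.2.2.2 false)), true) := by unfold pvBStep; rw [if_pos hc]
      rw [hstep, pvBFold_flag] at h; cases h
    · have hstep : pvBStep (σ, p) g = (σ, p) := by unfold pvBStep; rw [if_neg hc]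
      rw [hstep] at h
      have hag : pvApplyGate σ g = σ := by unfold pvApplyGate; rw [if_neg hc]
      have : pvSweep (g :: gs) σ = pvSweep gs (pvApplyGate σ g) := rfl
      rw [this, hag]
      exact ih h

lemma pvBLoop_eq_iterate (gates : List (String × String × String × String)) (fuel : Nat)
    (σ : PySem.Dict String Bool) : pvBLoop gates fuel σ = (pvSweep gates)^[fuel] σ := by
  induction fuel generalizing σ with
  | zero => rfl
  | succ fuel ih =>
    show (let st := gates.foldl pvBStep (σ, false)
      if st.2 then pvBLoop gates fuel st.1 else st.1) = _
    rw [Function.iterate_succ_apply]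
    by_cases hp : (gates.foldl pvBStep (σ, false)).2 = true
    · simp only [hp, if_true]
      rw [pvBFold_fst, ih]
    · have hp' : (gates.foldl pvBStep (σ, false)).2 = false := by
        cases hcc : (gates.foldl pvBStep (σ, false)).2 <;> simp_all
      simp only [hp', Bool.false_eq_true, if_false]
      rw [pvBFold_fst]
      have hfix := pvBFold_no_progress hp'
      rw [hfix, Function.iterate_fixed hfix]

-- ---- the depends_on dictionary ----

lemma pvDeps_spec_aux (gs : List (String × String × String × String)) (c : String) :
    ∀ d : PySem.Dict String (List String),
    (gs.foldl (fun d g => (d.modify g.2.2.1 [] (fun l => l ++ [g.1])).modify g.2.2.2 [] (fun l => l ++ [g.1]))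
        d).getD c []
      = d.getD c [] ++ gs.flatMap (fun g =>
          (if c = g.2.2.1 then [g.1] else []) ++ (if c = g.2.2.2 then [g.1] else [])) := by
  induction gs with
  | nil => intro d; simp
  | cons g gs ih =>
    intro d
    rw [List.foldl_cons, ih, List.flatMap_cons]
    have hstep : ((d.modify g.2.2.1 [] (fun l => l ++ [g.1])).modify g.2.2.2 [] (fun l => l ++ [g.1])).getD c []
        = d.getD c [] ++ ((if c = g.2.2.1 then [g.1] else []) ++ (if c = g.2.2.2 then [g.1] else [])) := by
      clear ih
      rw [PySem.Dict.getD_modify, PySem.Dict.getD_modify]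
      by_cases h1 : c = g.2.2.1 <;> by_cases h2 : c = g.2.2.2
      · simp [← h1, ← h2]
      · simp [← h1, h2]
      · simp [← h2, h1]
      · simp [PySem.Dict.getD_modify, h1, h2]
    rw [hstep, List.append_assoc]

lemma pvDeps_spec (gs : List (String × String × String × String)) (c : String) :
    (gs.foldl (fun d g => (d.modify g.2.2.1 [] (fun l => l ++ [g.1])).modify g.2.2.2 [] (fun l => l ++ [g.1]))
        (PySem.Dict.empty : PySem.Dict String (List String))).getD c []
      = gs.flatMap (fun g =>
          (if c = g.2.2.1 then [g.1] else []) ++ (if c = g.2.2.2 then [g.1] else [])) := by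
  rw [pvDeps_spec_aux]
  rw [PySem.Dict.getD_empty]
  rfl

lemma pvDeps_mem {gs : List (String × String × String × String)} {c x : String} :
    (x ∈ gs.flatMap (fun g =>
        (if c = g.2.2.1 then [g.1] else []) ++ (if c = g.2.2.2 then [g.1] else [])))
      ↔ pvGateFor gs x c := by
  rw [List.mem_flatMap]
  unfold pvGateFor
  constructor
  · rintro ⟨g, hg, hx⟩
    rcases List.mem_append.mp hx with hx | hx
    · by_cases h1 : c = g.2.2.1
      · simp [h1] at hx; exact ⟨g, hg, hx ▸ rfl, Or.inl h1.symm⟩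
      · simp [h1] at hx
    · by_cases h1 : c = g.2.2.2
      · simp [h1] at hx; exact ⟨g, hg, hx ▸ rfl, Or.inr h1.symm⟩
      · simp [h1] at hx
  · rintro ⟨g, hg, hgx, hcur⟩
    refine ⟨g, hg, ?_⟩
    rw [List.mem_append]
    rcases hcur with h | h
    · exact Or.inl (by simp [h.symm, hgx])
    · exact Or.inr (by simp [h.symm, hgx])

lemma pvDeps_len (gs : List (String × String × String × String)) (c : String) :
    (gs.flatMap (fun g =>
        (if c = g.2.2.1 then [g.1] else []) ++ (if c = g.2.2.2 then [g.1] else []))).length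
      ≤ 2 * gs.length := by
  induction gs with
  | nil => simp
  | cons g gs ih =>
    rw [List.flatMap_cons, List.length_append, List.length_cons, List.length_append]
    have h1 : (if c = g.2.2.1 then [g.1] else []).length ≤ 1 := by split <;> simp
    have h2 : (if c = g.2.2.2 then [g.1] else []).length ≤ 1 := by split <;> simp
    omega

-- ---- ofList facts ----

lemma pvKeys_foldl_sub {α : Type} (l : List (String × α)) :
    ∀ (d : PySem.Dict String α) k, k ∈ (l.foldl (fun acc p => acc.insert p.1 p.2) d).keys →
      k ∈ d.keys ∨ k ∈ l.map (fun p => p.1) := by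
  induction l with
  | nil => intro d k h; exact Or.inl h
  | cons p l ih =>
    intro d k h
    rw [List.foldl_cons] at h
    rcases ih (d.insert p.1 p.2) k h with h1 | h1
    · rcases (PySem.Dict.mem_keys_insert _ _ _ _).mp h1 with h2 | h2
      · exact Or.inr (by simp [h2])
      · exact Or.inl h2
    · exact Or.inr (by rw [List.map_cons]; exact List.mem_cons_of_mem _ h1)

lemma pvKeys_ofList_sub {α : Type} (l : List (String × α)) :
    ∀ k ∈ (PySem.Dict.ofList l).keys, k ∈ l.map (fun p => p.1) := by
  intro k h
  unfold PySem.Dict.ofList PySem.Dict.update at h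
  rcases pvKeys_foldl_sub l PySem.Dict.empty k h with h1 | h1
  · rw [PySem.Dict.keys_empty] at h1; cases h1
  · exact h1

lemma pvSize_foldl_le {α : Type} (l : List (String × α)) :
    ∀ (d : PySem.Dict String α), (l.foldl (fun acc p => acc.insert p.1 p.2) d).size
      ≤ d.size + l.length := by
  induction l with
  | nil => intro d; simp
  | cons p l ih =>
    intro d
    rw [List.foldl_cons]
    have h1 := ih (d.insert p.1 p.2)
    have h2 : (d.insert p.1 p.2).size ≤ d.size + 1 := by
      rw [PySem.Dict.size_insert]; split <;> omega
    simp only [List.length_cons]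
    omega

lemma pvSize_ofList_le {α : Type} (l : List (String × α)) :
    (PySem.Dict.ofList l).size ≤ l.length := by
  have := pvSize_foldl_le l PySem.Dict.empty
  unfold PySem.Dict.ofList PySem.Dict.update
  have he : (PySem.Dict.empty : PySem.Dict String α).size = 0 := rfl
  omega

-- ---- completeness at empty queue ----

lemma pvComplete {base σ wires : PySem.Dict String Bool}
    {gates : List (String × String × String × String)} {m : Nat}
    (hσ : σ = pvSigma base gates m)
    (hgk : (gates.map (fun g => g.1)).Nodup)
    (hC : pvCInv gates σ wires [])
    (hbw : pvSubmap base wires) :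
    ∀ w, σ.contains w = true → wires.contains w = true := by
  subst hσ
  suffices H : ∀ s w, pvStage base (pvFlat gates m) w ≤ s →
      (pvSigma base gates m).contains w = true → wires.contains w = true by
    intro w hw
    exact H (pvStage base (pvFlat gates m) w) w (Nat.le_refl _) hw
  intro s
  induction s with
  | zero =>
    intro w hst hw
    by_contra hc
    have hc' : wires.contains w = false := by cases hcc : wires.contains w <;> simp_all
    obtain ⟨u, hgf, hu, hcl⟩ := hC w hw hc'
    have hbw' : base.contains w = false := by
      by_contra hb
      have hb' : base.contains w = true := by cases hbb : base.contains w <;> simp_all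
      obtain ⟨v, hv⟩ := pvGet?_of_contains hb'
      rw [pvContains_of_get? (hbw w v hv)] at hc'; cases hc'
    obtain ⟨g₀, hg₀, hkey, _, a, b, _, _, _, hs1, hs2⟩ := pvGateFact hw hbw'
    obtain ⟨g, hg, hgkey, hcur⟩ := hgf
    have : g = g₀ := pvKey_unique hgk hg hg₀ (by rw [hgkey, hkey])
    subst this
    rcases hcur with h | h <;> rw [← h] at hu <;> omega
  | succ s ih =>
    intro w hst hw
    rcases Nat.lt_or_ge s (pvStage base (pvFlat gates m) w) with hgt | hle
    case inr => exact ih w hle hw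
    by_contra hc
    have hc' : wires.contains w = false := by cases hcc : wires.contains w <;> simp_all
    obtain ⟨u, hgf, hu, hcl⟩ := hC w hw hc'
    have hbw' : base.contains w = false := by
      by_contra hb
      have hb' : base.contains w = true := by cases hbb : base.contains w <;> simp_all
      obtain ⟨v, hv⟩ := pvGet?_of_contains hb'
      rw [pvContains_of_get? (hbw w v hv)] at hc'; cases hc'
    obtain ⟨g₀, hg₀, hkey, _, a, b, _, _, _, hs1, hs2⟩ := pvGateFact hw hbw'
    obtain ⟨g, hg, hgkey, hcur⟩ := hgf
    have : g = g₀ := pvKey_unique hgk hg hg₀ (by rw [hgkey, hkey])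
    subst this
    have hustage : pvStage base (pvFlat gates m) u ≤ s := by
      rcases hcur with h | h <;> rw [← h] <;> omega
    have := ih u hustage hu
    rcases hcl with h | h
    · rw [this] at h; cases h
    · cases h

-- ---- the inner for-loop of A ----

lemma pvFireIf (σ : PySem.Dict String Bool) (w op : String) (a b : Bool) :
    (if op == "XOR" then σ.insert w (xor a b)
     else if op == "OR" then σ.insert w (a || b)
     else if op == "AND" then σ.insert w (a && b)
     else σ)
    = if pvValidOp op = true then σ.insert w (pvOpVal op a b) else σ := by
  unfold pvValidOp pvOpVal
  by_cases h1 : op == "XOR"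
  · simp [h1]
  · by_cases h2 : op == "OR"
    · simp [h1, h2]
    · by_cases h3 : op == "AND"
      · simp [h1, h2, h3]
      · simp [h1, h2, h3]

lemma pvAStep_eq {calcD : PySem.Dict String (String × String × String)}
    {wires₁ : PySem.Dict String Bool} {q : List String} {d op l r : String}
    (hlookup : calcD.get? d = some (op, l, r)) :
    pvAStep calcD (wires₁, q) d =
      if wires₁.contains l && wires₁.contains r then
        ((if pvValidOp op = true then
            wires₁.insert d (pvOpVal op (wires₁.getD l false) (wires₁.getD r false))
          else wires₁), q ++ [d])
      else (wires₁, q) := by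
  unfold pvAStep
  rw [hlookup]
  simp only []
  rw [pvFireIf]

lemma pvAStep_fst_cases (calcD : PySem.Dict String (String × String × String))
    (st : PySem.Dict String Bool × List String) (x : String) :
    (pvAStep calcD st x).1 = st.1 ∨ ∃ v, (pvAStep calcD st x).1 = st.1.insert x v := by
  unfold pvAStep
  cases hm : calcD.get? x with
  | none => exact Or.inl rfl
  | some g =>
    rcases g with ⟨op, l, r⟩
    simp only []
    split
    · rw [pvFireIf]
      split
      · exact Or.inr ⟨_, rfl⟩
      · exact Or.inl rfl
    · exact Or.inl rfl

lemma pvAFold_contains_mono (calcD : PySem.Dict String (String × String × String)) :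
    ∀ (ds : List String) (st : PySem.Dict String Bool × List String) (k : String),
      st.1.contains k = true → ((ds.foldl (pvAStep calcD) st).1).contains k = true := by
  intro ds
  induction ds with
  | nil => intro st k h; exact h
  | cons x ds ih =>
    intro st k h
    rw [List.foldl_cons]
    apply ih
    rcases pvAStep_fst_cases calcD st x with hc | ⟨v, hc⟩
    · rw [hc]; exact h
    · rw [hc, PySem.Dict.contains_insert, h]; simp

lemma pvFold {base σ : PySem.Dict String Bool} {gates : List (String × String × String × String)}
    {m : Nat} {calcD : PySem.Dict String (String × String × String)}
    (hσ : σ = pvSigma base gates m)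
    (hgk : (gates.map (fun g => g.1)).Nodup)
    (hlook : ∀ g ∈ gates, calcD.get? g.1 = some g.2)
    (hdisj : ∀ g ∈ gates, base.contains g.1 = false)
    (hclosed : ∀ g ∈ gates, pvValidOp g.2.1 = true → σ.contains g.2.2.1 = true →
      σ.contains g.2.2.2 = true → σ.contains g.1 = true)
    (current : String) :
    ∀ (ds : List String), (∀ d ∈ ds, pvGateFor gates d current) →
    ∀ (wires₁ : PySem.Dict String Bool) (q : List String),
      pvSubmap wires₁ σ → pvSubmap base wires₁ → wires₁.keys.Nodup →
      ∃ newap, (ds.foldl (pvAStep calcD) (wires₁, q)).2 = q ++ newap ∧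
        pvSubmap (ds.foldl (pvAStep calcD) (wires₁, q)).1 σ ∧
        pvSubmap base (ds.foldl (pvAStep calcD) (wires₁, q)).1 ∧
        (ds.foldl (pvAStep calcD) (wires₁, q)).1.keys.Nodup ∧
        (∀ u ∈ newap, (σ.contains u = true ∧
            pvStage base (pvFlat gates m) current < pvStage base (pvFlat gates m) u)
          ∨ σ.contains u = false) ∧
        newap.length ≤ ds.length ∧
        (∀ k, (ds.foldl (pvAStep calcD) (wires₁, q)).1.contains k = true →
          wires₁.contains k = true ∨ k ∈ newap) ∧
        (∀ d ∈ ds, σ.contains d = true →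
          (ds.foldl (pvAStep calcD) (wires₁, q)).1.contains d = true ∨
          ∃ u, pvGateFor gates d u ∧ σ.contains u = true ∧
            ((ds.foldl (pvAStep calcD) (wires₁, q)).1.contains u = false ∨ u ∈ newap)) := by
  subst hσ
  intro ds
  induction ds with
  | nil =>
    intro _ wires₁ q hsub hbsub hnd
    refine ⟨[], by simp, hsub, hbsub, hnd, by simp, by simp, fun k hk => Or.inl hk,
      fun d hd => absurd hd (List.not_mem_nil)⟩
  | cons d ds ih =>
    intro hall wires₁ q hsub hbsub hnd
    obtain ⟨⟨gw, op, l, r⟩, hg, hgkey, hgcur⟩ := hall d (List.mem_cons_self)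
    simp only [] at hgkey hgcur
    subst hgkey
    have hlookup : calcD.get? gw = some (op, l, r) := hlook (gw, op, l, r) hg
    rw [List.foldl_cons, pvAStep_eq hlookup]
    by_cases hguard : (wires₁.contains l && wires₁.contains r) = true
    · rw [if_pos hguard]
      have hwl : wires₁.contains l = true := (Bool.and_eq_true_iff.mp hguard).1
      have hwr : wires₁.contains r = true := (Bool.and_eq_true_iff.mp hguard).2
      have hla : wires₁.get? l = some (wires₁.getD l false) := pvGet?_getD hwl
      have hra : wires₁.get? r = some (wires₁.getD r false) := pvGet?_getD hwr
      have hσl : (pvSigma base gates m).get? l = some (wires₁.getD l false) := hsub l _ hla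
      have hσr : (pvSigma base gates m).get? r = some (wires₁.getD r false) := hsub r _ hra
      have hσlc : (pvSigma base gates m).contains l = true := pvContains_of_get? hσl
      have hσrc : (pvSigma base gates m).contains r = true := pvContains_of_get? hσr
      have hbd : base.contains gw = false := hdisj (gw, op, l, r) hg
      by_cases hvalid : pvValidOp op = true
      · rw [if_pos hvalid]
        have hσd : (pvSigma base gates m).contains gw = true :=
          hclosed (gw, op, l, r) hg hvalid hσlc hσrc
        obtain ⟨g₀, hg₀, hkey₀, hval₀, a₀, b₀, hla₀, hra₀, hwv₀, hstl₀, hstr₀⟩ :=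
          pvGateFact hσd hbd
        have hgg : g₀ = (gw, op, l, r) := pvKey_unique hgk hg₀ hg hkey₀
        subst hgg
        simp only [] at hla₀ hra₀ hwv₀ hstl₀ hstr₀
        have ha : a₀ = wires₁.getD l false := by rw [hla₀] at hσl; injection hσl
        have hb : b₀ = wires₁.getD r false := by rw [hra₀] at hσr; injection hσr
        rw [ha, hb] at hwv₀
        set w₂ := wires₁.insert gw (pvOpVal op (wires₁.getD l false) (wires₁.getD r false))
          with hw₂
        have hsub₂ : pvSubmap w₂ (pvSigma base gates m) := by
          intro k v hk
          rw [hw₂, PySem.Dict.get?_insert] at hk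
          split at hk
          · next hkd => injection hk with hk'; rw [hkd, ← hk']; exact hwv₀
          · exact hsub k v hk
        have hbsub₂ : pvSubmap base w₂ := by
          intro k v hk
          rw [hw₂, PySem.Dict.get?_insert]
          split
          · next hkd => rw [hkd] at hk; rw [pvContains_of_get? hk] at hbd; cases hbd
          · exact hbsub k v hk
        have hnd₂ : w₂.keys.Nodup := PySem.Dict.nodup_keys_insert _ _ _ hnd
        obtain ⟨na, hres2, hsubF, hbsubF, hndF, hpropF, hlenF, hgrowF, hfiredF⟩ :=
          ih (fun x hx => hall x (List.mem_cons_of_mem _ hx)) w₂ (q ++ [gw]) hsub₂ hbsub₂ hnd₂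
        have hstcur : pvStage base (pvFlat gates m) current < pvStage base (pvFlat gates m) gw := by
          rcases hgcur with h | h <;> rw [← h] <;> omega
        refine ⟨gw :: na, ?_, hsubF, hbsubF, hndF, ?_, ?_, ?_, ?_⟩
        · rw [hres2, List.append_assoc]; rfl
        · intro u hu
          rcases List.mem_cons.mp hu with rfl | hu₁
          · exact Or.inl ⟨hσd, hstcur⟩
          · exact hpropF u hu₁
        · simp only [List.length_cons]; omega
        · intro k hk
          rcases hgrowF k hk with h1 | h1
          · rw [hw₂, PySem.Dict.contains_insert] at h1
            rcases Bool.or_eq_true_iff.mp h1 with h2 | h2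
            · exact Or.inr (by simp at h2; simp [h2])
            · exact Or.inl h2
          · exact Or.inr (List.mem_cons_of_mem _ h1)
        · intro d' hd' hσd'
          rcases List.mem_cons.mp hd' with rfl | hd₁
          · left
            apply pvAFold_contains_mono
            rw [hw₂, PySem.Dict.contains_insert]
            simp
          · rcases hfiredF d' hd₁ hσd' with h1 | ⟨u, hu1, hu2, hu3⟩
            · exact Or.inl h1
            · refine Or.inr ⟨u, hu1, hu2, ?_⟩
              rcases hu3 with h | h
              · exact Or.inl h
              · exact Or.inr (List.mem_cons_of_mem _ h)
      · rw [if_neg hvalid]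
        have hσdF : (pvSigma base gates m).contains gw = false := by
          by_contra hcc
          have hσd : (pvSigma base gates m).contains gw = true := by
            cases hc2 : (pvSigma base gates m).contains gw <;> simp_all
          obtain ⟨g₀, hg₀, hkey₀, hval₀, _⟩ := pvGateFact hσd hbd
          have hgg : g₀ = (gw, op, l, r) := pvKey_unique hgk hg₀ hg hkey₀
          rw [hgg] at hval₀
          exact absurd hval₀ (by simp [hvalid])
        obtain ⟨na, hres2, hsubF, hbsubF, hndF, hpropF, hlenF, hgrowF, hfiredF⟩ :=
          ih (fun x hx => hall x (List.mem_cons_of_mem _ hx)) wires₁ (q ++ [gw]) hsub hbsub hnd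
        refine ⟨gw :: na, ?_, hsubF, hbsubF, hndF, ?_, ?_, ?_, ?_⟩
        · rw [hres2, List.append_assoc]; rfl
        · intro u hu
          rcases List.mem_cons.mp hu with rfl | hu₁
          · exact Or.inr hσdF
          · exact hpropF u hu₁
        · simp only [List.length_cons]; omega
        · intro k hk
          rcases hgrowF k hk with h1 | h1
          · exact Or.inl h1
          · exact Or.inr (List.mem_cons_of_mem _ h1)
        · intro d' hd' hσd'
          rcases List.mem_cons.mp hd' with rfl | hd₁
          · rw [hσd'] at hσdF; cases hσdF
          · rcases hfiredF d' hd₁ hσd' with h1 | ⟨u, hu1, hu2, hu3⟩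
            · exact Or.inl h1
            · refine Or.inr ⟨u, hu1, hu2, ?_⟩
              rcases hu3 with h | h
              · exact Or.inl h
              · exact Or.inr (List.mem_cons_of_mem _ h)
    · rw [if_neg hguard]
      obtain ⟨na, hres2, hsubF, hbsubF, hndF, hpropF, hlenF, hgrowF, hfiredF⟩ :=
        ih (fun x hx => hall x (List.mem_cons_of_mem _ hx)) wires₁ q hsub hbsub hnd
      refine ⟨na, hres2, hsubF, hbsubF, hndF, hpropF, by simp only [List.length_cons]; omega,
        hgrowF, ?_⟩
      intro d' hd' hσd'
      rcases List.mem_cons.mp hd' with rfl | hd₁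
      · -- the gate did not fire: one of its inputs is missing from wires₁
        have hbd : base.contains d' = false := hdisj (d', op, l, r) hg
        obtain ⟨g₀, hg₀, hkey₀, hval₀, a₀, b₀, hla₀, hra₀, _⟩ := pvGateFact hσd' hbd
        have hgg : g₀ = (d', op, l, r) := pvKey_unique hgk hg₀ hg hkey₀
        subst hgg
        simp only [] at hla₀ hra₀
        have hσlc : (pvSigma base gates m).contains l = true := pvContains_of_get? hla₀
        have hσrc : (pvSigma base gates m).contains r = true := pvContains_of_get? hra₀
        have hmiss : wires₁.contains l = false ∨ wires₁.contains r = false := by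
          cases hcl : wires₁.contains l <;> cases hcr : wires₁.contains r <;> simp_all
        have hfin : ∀ u, wires₁.contains u = false →
            (ds.foldl (pvAStep calcD) (wires₁, q)).1.contains u = false ∨ u ∈ na := by
          intro u hu
          by_cases hru : (ds.foldl (pvAStep calcD) (wires₁, q)).1.contains u = true
          · rcases hgrowF u hru with h1 | h1
            · rw [h1] at hu; cases hu
            · exact Or.inr h1
          · exact Or.inl (by cases hcc : (ds.foldl (pvAStep calcD) (wires₁, q)).1.contains u <;>
              simp_all)
        rcases hmiss with h | h
        · exact Or.inr ⟨l, ⟨(d', op, l, r), hg, rfl, Or.inl rfl⟩, hσlc, hfin l h⟩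
        · exact Or.inr ⟨r, ⟨(d', op, l, r), hg, rfl, Or.inr rfl⟩, hσrc, hfin r h⟩
      · rcases hfiredF d' hd₁ hσd' with h1 | ⟨u, hu1, hu2, hu3⟩
        · exact Or.inl h1
        · exact Or.inr ⟨u, hu1, hu2, hu3⟩

-- ---- the master induction over A's queue ----

lemma pvALoop_nil (calcD : PySem.Dict String (String × String × String))
    (depends : PySem.Dict String (List String)) (fuel : Nat) (wires : PySem.Dict String Bool) :
    pvALoop calcD depends (fuel + 1) wires [] = wires := rfl

lemma pvALoop_cons_pos {calcD : PySem.Dict String (String × String × String)}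
    {depends : PySem.Dict String (List String)} {fuel : Nat} {wires : PySem.Dict String Bool}
    {current : String} {work : List String} (h : wires.contains current = true) :
    pvALoop calcD depends (fuel + 1) wires (current :: work)
      = pvALoop calcD depends fuel
          ((depends.getD current []).foldl (pvAStep calcD) (wires, work)).1
          ((depends.getD current []).foldl (pvAStep calcD) (wires, work)).2 := by
  simp [pvALoop, h]

lemma pvALoop_cons_neg {calcD : PySem.Dict String (String × String × String)}
    {depends : PySem.Dict String (List String)} {fuel : Nat} {wires : PySem.Dict String Bool}
    {current : String} {work : List String} (h : wires.contains current = false) :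
    pvALoop calcD depends (fuel + 1) wires (current :: work)
      = pvALoop calcD depends fuel wires work := by
  simp [pvALoop, h]

lemma pvPhi_append (base : PySem.Dict String Bool) (gates) (m : Nat) (xs ys : List String) :
    pvPhi base gates m (xs ++ ys) = pvPhi base gates m xs + pvPhi base gates m ys := by
  simp [pvPhi]

lemma pvPhi_cons (base : PySem.Dict String Bool) (gates) (m : Nat) (x : String) (xs : List String) :
    pvPhi base gates m (x :: xs) = pvPot base gates m x + pvPhi base gates m xs := by
  simp [pvPhi]

lemma pvPot_pos (base : PySem.Dict String Bool) (gates) (m : Nat) (w : String) :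
    1 ≤ pvPot base gates m w := by
  unfold pvPot
  split
  · exact Nat.one_le_pow _ _ (by omega)
  · exact Nat.le_refl _

lemma pvMaster {base σ : PySem.Dict String Bool} {gates : List (String × String × String × String)}
    {m : Nat} {calcD : PySem.Dict String (String × String × String)}
    {depends : PySem.Dict String (List String)}
    (hσ : σ = pvSigma base gates m)
    (hgk : (gates.map (fun g => g.1)).Nodup)
    (hlook : ∀ g ∈ gates, calcD.get? g.1 = some g.2)
    (hdisj : ∀ g ∈ gates, base.contains g.1 = false)
    (hclosed : ∀ g ∈ gates, pvValidOp g.2.1 = true → σ.contains g.2.2.1 = true →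
      σ.contains g.2.2.2 = true → σ.contains g.1 = true)
    (hdep : ∀ c, ∀ x, (x ∈ depends.getD c [] ↔ pvGateFor gates x c))
    (hdeplen : ∀ c, (depends.getD c []).length ≤ 2 * gates.length) :
    ∀ fuel (wires : PySem.Dict String Bool) (work : List String),
      pvSubmap wires σ → pvSubmap base wires → wires.keys.Nodup →
      pvCInv gates σ wires work →
      pvPhi base gates m work < fuel →
      (∀ k, (pvALoop calcD depends fuel wires work).get? k = σ.get? k) ∧
        (pvALoop calcD depends fuel wires work).keys.Nodup := by
  subst hσ
  intro fuel
  induction fuel with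
  | zero => intro wires work _ _ _ _ hPhi; omega
  | succ fuel ih =>
    intro wires work hsub hbsub hnd hC hPhi
    cases work with
    | nil =>
      rw [pvALoop_nil]
      refine ⟨?_, hnd⟩
      intro k
      cases hw : wires.get? k with
      | some v => rw [hsub k v hw]
      | none =>
        cases hσk : (pvSigma base gates m).get? k with
        | none => rfl
        | some v =>
          exfalso
          have hck := pvComplete rfl hgk hC hbsub k (pvContains_of_get? hσk)
          obtain ⟨v', hv'⟩ := pvGet?_of_contains hck
          rw [hv'] at hw; cases hw
    | cons current work =>
      by_cases hcur : wires.contains current = true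
      · rw [pvALoop_cons_pos hcur]
        have hσcur : (pvSigma base gates m).contains current = true := pvSubmap_contains hsub hcur
        have hds : ∀ d ∈ depends.getD current [], pvGateFor gates d current :=
          fun d hd => (hdep current d).mp hd
        obtain ⟨na, hres2, hsubF, hbsubF, hndF, hpropF, hlenF, hgrowF, hfiredF⟩ :=
          pvFold rfl hgk hlook hdisj hclosed current (depends.getD current []) hds
            wires work hsub hbsub hnd
        rw [hres2]
        apply ih _ _ hsubF hbsubF hndF
        · -- the completeness invariant survives the pop
          intro w hw hnw
          have hwold : wires.contains w = false := by
            by_contra hcc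
            have : wires.contains w = true := by cases h2 : wires.contains w <;> simp_all
            rw [pvAFold_contains_mono calcD _ _ _ this] at hnw; cases hnw
          obtain ⟨u, hgf, hσu, hclause⟩ := hC w hw hwold
          rcases hclause with hnc | hmem
          · by_cases hru : ((depends.getD current []).foldl (pvAStep calcD) (wires, work)).1.contains u = true
            · rcases hgrowF u hru with h1 | h1
              · rw [h1] at hnc; cases hnc
              · exact ⟨u, hgf, hσu, Or.inr (List.mem_append_right _ h1)⟩
            · refine ⟨u, hgf, hσu, Or.inl ?_⟩
              cases h2 : ((depends.getD current []).foldl (pvAStep calcD) (wires, work)).1.contains u <;> simp_all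
          · rcases List.mem_cons.mp hmem with rfl | hmem₁
            · have hdw : w ∈ depends.getD u [] := (hdep u w).mpr hgf
              rcases hfiredF w hdw hw with h1 | ⟨u', hgf', hσu', hclause'⟩
              · rw [h1] at hnw; cases hnw
              · refine ⟨u', hgf', hσu', ?_⟩
                rcases hclause' with h | h
                · exact Or.inl h
                · exact Or.inr (List.mem_append_right _ h)
            · exact ⟨u, hgf, hσu, Or.inr (List.mem_append_left _ hmem₁)⟩
        · -- the potential strictly decreases
          rw [pvPhi_append]
          rw [pvPhi_cons] at hPhi
          have hL : (pvSi base (pvFlat gates m) (pvFlat gates m).length).contains current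
              = true := by rw [pvSi_length]; exact hσcur
          have hsle := (pvStage_spec hL).1
          have hx1 : 1 ≤ (2 * gates.length + 2) ^ ((pvFlat gates m).length + 1
              - pvStage base (pvFlat gates m) current - 1) := Nat.one_le_pow _ _ (by omega)
          have hpc : pvPot base gates m current = (2 * gates.length + 2)
              ^ ((pvFlat gates m).length + 1 - pvStage base (pvFlat gates m) current - 1)
              * (2 * gates.length + 2) := by
            unfold pvPot
            rw [if_pos hσcur, ← pow_succ]
            congr 1
            omega
          have hone : ∀ u ∈ na, pvPot base gates m u ≤ (2 * gates.length + 2)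
              ^ ((pvFlat gates m).length + 1 - pvStage base (pvFlat gates m) current - 1) := by
            intro u hu
            rcases hpropF u hu with ⟨hσu, hst⟩ | hσu
            · unfold pvPot
              rw [if_pos hσu]
              exact Nat.pow_le_pow_right (by omega) (by omega)
            · unfold pvPot
              rw [if_neg (by simp [hσu])]
              exact hx1
          have hsum : pvPhi base gates m na ≤ na.length * ((2 * gates.length + 2)
              ^ ((pvFlat gates m).length + 1 - pvStage base (pvFlat gates m) current - 1)) := by
            unfold pvPhi
            have := List.sum_le_card_nsmul (na.map (pvPot base gates m)) ((2 * gates.length + 2)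
              ^ ((pvFlat gates m).length + 1 - pvStage base (pvFlat gates m) current - 1)) (by
              intro x hx
              obtain ⟨u, hu, hxu⟩ := List.mem_map.mp hx
              rw [← hxu]; exact hone u hu)
            simpa [smul_eq_mul] using this
          have hnalen : na.length ≤ 2 * gates.length := Nat.le_trans hlenF (hdeplen current)
          generalize hXg : (2 * gates.length + 2) ^ ((pvFlat gates m).length + 1
              - pvStage base (pvFlat gates m) current - 1) = X at hx1 hpc hsum
          have hmul : na.length * X ≤ 2 * gates.length * X := Nat.mul_le_mul_right _ hnalen
          have hXB : X * (2 * gates.length + 2) = 2 * gates.length * X + 2 * X := by ring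
          generalize hP : 2 * gates.length * X = P at hmul hXB
          generalize hQ : na.length * X = Q at hmul hsum
          generalize hR : X * (2 * gates.length + 2) = R at hXB hpc
          omega
      · have hcur' : wires.contains current = false := by
          cases h2 : wires.contains current <;> simp_all
        rw [pvALoop_cons_neg hcur']
        apply ih _ _ hsub hbsub hnd
        · intro w hw hnw
          obtain ⟨u, hgf, hσu, hclause⟩ := hC w hw hnw
          rcases hclause with hnc | hmem
          · exact ⟨u, hgf, hσu, Or.inl hnc⟩
          · rcases List.mem_cons.mp hmem with rfl | hmem₁
            · exact ⟨u, hgf, hσu, Or.inl hcur'⟩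
            · exact ⟨u, hgf, hσu, Or.inr hmem₁⟩
        · rw [pvPhi_cons] at hPhi
          have := pvPot_pos base gates m current
          omega

-- ---- the final z-sum only depends on the dictionary as a key → value map ----

lemma pvBefore_eq (a b : String × Bool) :
    (decide (a.1 < b.1) || (!decide (b.1 < a.1) && decide (a.2 < b.2)))
      = decide ((toLex (a.1, a.2) : Lex (String × Bool)) < toLex (b.1, b.2)) := by
  rcases lt_trichotomy a.1 b.1 with h | h | h
  · simp [h, Prod.Lex.lt_iff]
  · simp [h, Prod.Lex.lt_iff]
  · have h1 : ¬ a.1 < b.1 := lt_asymm h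
    have h2 : ¬ a.1 = b.1 := ne_of_gt h
    simp [h, h1, h2, Prod.Lex.lt_iff]

lemma pvSorted2_eq_sorted_lex (xs : List (String × Bool)) :
    PySem.List.sorted2 xs (fun kv => kv.1) (fun kv => kv.2)
      = PySem.List.sorted xs (fun kv => (toLex (kv.1, kv.2) : Lex (String × Bool))) := by
  unfold PySem.List.sorted2 PySem.List.sorted
  simp only [if_neg (by simp : ¬ (false = true))]
  congr 1
  funext acc x
  congr 1
  funext a b
  exact pvBefore_eq a b

lemma pvZSum_congr {d d' : PySem.Dict String Bool} (hd : d.keys.Nodup) (hd' : d'.keys.Nodup)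
    (h : ∀ k, d.get? k = d'.get? k) : pvZSum d = pvZSum d' := by
  have hni : d.items.Nodup := by
    simp only [PySem.Dict.keys] at hd
    exact hd.of_map
  have hni' : d'.items.Nodup := by
    simp only [PySem.Dict.keys] at hd'
    exact hd'.of_map
  have hperm : d.items.Perm d'.items := by
    rw [List.perm_ext_iff_of_nodup hni hni']
    rintro ⟨k, v⟩
    rw [← PySem.Dict.get?_eq_some_iff_mem_items d k v hd,
      ← PySem.Dict.get?_eq_some_iff_mem_items d' k v hd', h k]
  have hpermf := hperm.filter (fun kv => PySem.Str.startswith kv.1 "z")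
  have hinj : Function.Injective (fun kv : String × Bool => (toLex (kv.1, kv.2) : Lex (String × Bool))) := by
    intro p q hpq
    have := congrArg ofLex hpq
    simpa using this
  unfold pvZSum
  rw [pvSorted2_eq_sorted_lex, pvSorted2_eq_sorted_lex,
    PySem.List.sorted_eq_sorted_of_perm _ _ _ hinj hpermf]

-- ---- assembling the verdict ----

lemma pvCalculate_alt_eq (known : List (String × Bool))
    (calculated : List (String × String × String × String)) :
    calculate_alt known calculated
      = pvZSum (pvSigma (PySem.Dict.ofList known) (PySem.Dict.ofList calculated).items
          (calculated.length + 1)) := by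
  show pvZSum (pvBLoop (PySem.Dict.ofList calculated).items (calculated.length + 1)
    (PySem.Dict.ofList known)) = _
  rw [pvBLoop_eq_iterate, ← pvSigma_eq_iterate]

lemma pvCalculate_eq (known : List (String × Bool))
    (calculated : List (String × String × String × String))
    (hpre : Pre_calculate known calculated) :
    calculate known calculated
      = pvZSum (pvSigma (PySem.Dict.ofList known) (PySem.Dict.ofList calculated).items
          (calculated.length + 1)) := by
  show pvZSum (pvALoop (PySem.Dict.ofList calculated)
      ((PySem.Dict.ofList calculated).items.foldl
        (fun d g => (d.modify g.2.2.1 [] (fun l => l ++ [g.1])).modify g.2.2.2 []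
          (fun l => l ++ [g.1])) PySem.Dict.empty)
      (known.length * (2 * calculated.length + 2) ^ (calculated.length * (calculated.length + 1) + 1) + 1)
      (PySem.Dict.ofList known) (PySem.Dict.ofList known).keys) = _
  have hkeysnd : (PySem.Dict.ofList calculated).keys.Nodup := PySem.Dict.nodup_keys_ofList _
  have hgk : (((PySem.Dict.ofList calculated).items).map (fun g => g.1)).Nodup := by
    simp only [PySem.Dict.keys] at hkeysnd
    exact hkeysnd
  have hlook : ∀ g ∈ (PySem.Dict.ofList calculated).items,
      (PySem.Dict.ofList calculated).get? g.1 = some g.2 :=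
    fun g hg => PySem.Dict.get?_of_mem_items _ hg hkeysnd
  have hdisj : ∀ g ∈ (PySem.Dict.ofList calculated).items,
      (PySem.Dict.ofList known).contains g.1 = false := by
    intro g hg
    by_contra hcc
    have hct : (PySem.Dict.ofList known).contains g.1 = true := by
      cases h2 : (PySem.Dict.ofList known).contains g.1 <;> simp_all
    have h1 : g.1 ∈ known.map (fun p => p.1) :=
      pvKeys_ofList_sub known g.1 ((PySem.Dict.contains_iff_mem_keys _ _).mp hct)
    have h2 : g.1 ∈ calculated.map (fun p => p.1) :=
      pvKeys_ofList_sub calculated g.1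
        (PySem.Dict.mem_keys_of_mem_items (PySem.Dict.ofList calculated) hg)
    obtain ⟨p, hp, hp1⟩ := List.mem_map.mp h1
    obtain ⟨q, hq, hq1⟩ := List.mem_map.mp h2
    exact hpre p hp q hq (by rw [hp1, hq1])
  have hndb : (PySem.Dict.ofList known).keys.Nodup := PySem.Dict.nodup_keys_ofList _
  have hGle : (PySem.Dict.ofList calculated).items.length ≤ calculated.length :=
    pvSize_ofList_le calculated
  have hm : (PySem.Dict.ofList calculated).items.length < calculated.length + 1 := by omega
  have hclosed := pvClosed (gates := (PySem.Dict.ofList calculated).items)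
    (m := calculated.length + 1) hndb hm
  have hdepeq : ∀ c, ((PySem.Dict.ofList calculated).items.foldl
      (fun d g => (d.modify g.2.2.1 [] (fun l => l ++ [g.1])).modify g.2.2.2 []
        (fun l => l ++ [g.1])) PySem.Dict.empty).getD c []
      = (PySem.Dict.ofList calculated).items.flatMap (fun g =>
          (if c = g.2.2.1 then [g.1] else []) ++ (if c = g.2.2.2 then [g.1] else [])) :=
    fun c => pvDeps_spec _ c
  have hdep : ∀ c x, (x ∈ ((PySem.Dict.ofList calculated).items.foldl
      (fun d g => (d.modify g.2.2.1 [] (fun l => l ++ [g.1])).modify g.2.2.2 []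
        (fun l => l ++ [g.1])) PySem.Dict.empty).getD c [])
      ↔ pvGateFor (PySem.Dict.ofList calculated).items x c := by
    intro c x
    rw [hdepeq c]
    exact pvDeps_mem
  have hdeplen : ∀ c, (((PySem.Dict.ofList calculated).items.foldl
      (fun d g => (d.modify g.2.2.1 [] (fun l => l ++ [g.1])).modify g.2.2.2 []
        (fun l => l ++ [g.1])) PySem.Dict.empty).getD c []).length
      ≤ 2 * (PySem.Dict.ofList calculated).items.length := by
    intro c
    rw [hdepeq c]
    exact pvDeps_len _ c
  have hsub : pvSubmap (PySem.Dict.ofList known)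
      (pvSigma (PySem.Dict.ofList known) (PySem.Dict.ofList calculated).items
        (calculated.length + 1)) := pvBase_sub_sigma _ _ _
  have hC : pvCInv (PySem.Dict.ofList calculated).items
      (pvSigma (PySem.Dict.ofList known) (PySem.Dict.ofList calculated).items
        (calculated.length + 1))
      (PySem.Dict.ofList known) (PySem.Dict.ofList known).keys := by
    intro w hw hnw
    obtain ⟨g₀, hg₀, hkey₀, hval₀, a₀, b₀, hla₀, hra₀, _⟩ := pvGateFact hw hnw
    refine ⟨g₀.2.2.1, ⟨g₀, hg₀, hkey₀, Or.inl rfl⟩, pvContains_of_get? hla₀, ?_⟩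
    by_cases hcu : (PySem.Dict.ofList known).contains g₀.2.2.1 = true
    · exact Or.inr ((PySem.Dict.contains_iff_mem_keys _ _).mp hcu)
    · exact Or.inl (by cases h2 : (PySem.Dict.ofList known).contains g₀.2.2.1 <;> simp_all)
  have hflatlen : (pvFlat (PySem.Dict.ofList calculated).items (calculated.length + 1)).length
      = (calculated.length + 1) * (PySem.Dict.ofList calculated).items.length := by
    unfold pvFlat
    rw [List.length_flatten, List.map_replicate, List.sum_replicate, smul_eq_mul]
  have hPhi : pvPhi (PySem.Dict.ofList known) (PySem.Dict.ofList calculated).items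
      (calculated.length + 1) (PySem.Dict.ofList known).keys
      < known.length * (2 * calculated.length + 2)
          ^ (calculated.length * (calculated.length + 1) + 1) + 1 := by
    have hpotb : ∀ w, pvPot (PySem.Dict.ofList known) (PySem.Dict.ofList calculated).items
        (calculated.length + 1) w
        ≤ (2 * calculated.length + 2) ^ (calculated.length * (calculated.length + 1) + 1) := by
      intro w
      have hexp : (pvFlat (PySem.Dict.ofList calculated).items (calculated.length + 1)).length + 1
          ≤ calculated.length * (calculated.length + 1) + 1 := by
        rw [hflatlen]
        have h1 : (calculated.length + 1) * (PySem.Dict.ofList calculated).items.length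
            ≤ (calculated.length + 1) * calculated.length := Nat.mul_le_mul_left _ hGle
        have hcomm : (calculated.length + 1) * calculated.length
            = calculated.length * (calculated.length + 1) := Nat.mul_comm _ _
        omega
      unfold pvPot
      split
      · calc (2 * (PySem.Dict.ofList calculated).items.length + 2)
            ^ ((pvFlat (PySem.Dict.ofList calculated).items (calculated.length + 1)).length + 1
              - pvStage (PySem.Dict.ofList known)
                  (pvFlat (PySem.Dict.ofList calculated).items (calculated.length + 1)) w)
            ≤ (2 * calculated.length + 2)
              ^ ((pvFlat (PySem.Dict.ofList calculated).items (calculated.length + 1)).length + 1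
                - pvStage (PySem.Dict.ofList known)
                    (pvFlat (PySem.Dict.ofList calculated).items (calculated.length + 1)) w) :=
            Nat.pow_le_pow_left (by omega) _
          _ ≤ (2 * calculated.length + 2)
              ^ (calculated.length * (calculated.length + 1) + 1) :=
            Nat.pow_le_pow_right (by omega) (by omega)
      · exact Nat.one_le_pow _ _ (by omega)
    have hsum := List.sum_le_card_nsmul ((PySem.Dict.ofList known).keys.map
        (pvPot (PySem.Dict.ofList known) (PySem.Dict.ofList calculated).items
          (calculated.length + 1)))
        ((2 * calculated.length + 2) ^ (calculated.length * (calculated.length + 1) + 1)) (by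
      intro x hx
      obtain ⟨u, _, hxu⟩ := List.mem_map.mp hx
      rw [← hxu]; exact hpotb u)
    have hkl : (PySem.Dict.ofList known).keys.length ≤ known.length := by
      have h1 := pvSize_ofList_le known
      rw [pvSize_keys] at h1
      exact h1
    unfold pvPhi
    rw [smul_eq_mul, List.length_map] at hsum
    have h2 : (PySem.Dict.ofList known).keys.length
        * ((2 * calculated.length + 2) ^ (calculated.length * (calculated.length + 1) + 1))
        ≤ known.length * ((2 * calculated.length + 2)
            ^ (calculated.length * (calculated.length + 1) + 1)) :=
      Nat.mul_le_mul_right _ hkl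
    omega
  have hbsub : pvSubmap (PySem.Dict.ofList known) (PySem.Dict.ofList known) := fun k v hv => hv
  obtain ⟨hget, hnodup⟩ := pvMaster rfl hgk hlook hdisj hclosed hdep hdeplen
    (known.length * (2 * calculated.length + 2)
      ^ (calculated.length * (calculated.length + 1) + 1) + 1)
    (PySem.Dict.ofList known) (PySem.Dict.ofList known).keys hsub hbsub hndb hC hPhi
  have hσnd : (pvSigma (PySem.Dict.ofList known) (PySem.Dict.ofList calculated).items
      (calculated.length + 1)).keys.Nodup := by
    rw [pvSigma_eq_iterate]
    exact pvIter_nodup hndb _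
  exact pvZSum_congr hnodup hσnd hget

-- ===== VERDICT (by name: the statement is the Claim_ definition above) =====
theorem calculate_spec : Claim_equal_calculate := by
  intro known calculated _ hpre
  unfold Spec_calculate
  rw [pvCalculate_eq known calculated hpre, pvCalculate_alt_eq known calculated]
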